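-- pv_equiv track=rewrite | github.com/yulianasanta/Algoritmia-y-programaci-n-2026-1- | Funciones/Ejercicio2.py | procesar_lista_recursiva
-- ===== SOURCE A (Python) =====
-- def procesar_lista_recursiva(lista):
--     """
--     Recorre una lista, filtra los números pares y los eleva al cuadrado
--     usando recursividad en un solo paso.
--
--     Args:
--         lista: Es el conjunto de números que se quiere procesar
--
--     Returns:
--         Resultado: Una nueva lista filtrada y transformada
--
--     """
--     if not lista:
--         return []
--     """
--     Esta función hace que si la lista queda vacia pare y devuelva
--     la lista vacia
--     """
--     primero = lista[0]
--     resto = lista[1:]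
--     """
--     Se toma el primer número y deja el resto para
--     revisarlos despues. Eso es lo que recorre la lista.
--     """
--
--     if primero % 2 == 0:
--         """
--         Esta condición coge el primer número y lo divide entre dos
--         si el residuo es cero significa que el numero es par.
--         """
--         valor_transformado = primero ** 2
--         """
--         Si es par lo eleva al cuadrado
--         """
--         return [valor_transformado] + procesar_lista_recursiva(resto)
--     else:
--
--         return procesar_lista_recursiva(resto)
--     """
--     se usa el operador + para ir pegando los resultados.
--     Si el número era par pegamos el cuadrado del número y si
--     no era par no paga nada y devuelve lo que vanga en las
--     siguientes llamadas.
--     """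
-- ===== SOURCE B (Python) =====
-- def procesar_lista_recursiva(lista):
--     resultado = []
--     for x in lista:
--         if x % 2 == 0:
--             resultado.append(x ** 2)
--     return resultado
-- ===== Notes on version B (the rewrite author's own statement) =====
-- stated objective: simpler
-- what changed: Replaced the slice-based recursion with a single iterative for-loop accumulating squares of even elements into a list.
import Mathlib
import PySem

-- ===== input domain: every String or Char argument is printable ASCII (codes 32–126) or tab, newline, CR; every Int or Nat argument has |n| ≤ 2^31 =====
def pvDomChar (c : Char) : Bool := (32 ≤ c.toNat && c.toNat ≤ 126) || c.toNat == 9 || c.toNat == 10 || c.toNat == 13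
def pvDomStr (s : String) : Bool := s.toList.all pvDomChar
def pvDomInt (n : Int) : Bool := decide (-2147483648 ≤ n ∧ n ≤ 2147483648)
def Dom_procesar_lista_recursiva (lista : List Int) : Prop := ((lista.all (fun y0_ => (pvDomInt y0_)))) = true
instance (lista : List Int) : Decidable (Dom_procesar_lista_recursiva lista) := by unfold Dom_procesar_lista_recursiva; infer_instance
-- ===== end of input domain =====

-- B replaces the slice-based recursion with one iterative accumulator loop (simpler).


-- ===== PORT A =====
def procesar_lista_recursiva (lista : List Int) : List Int :=
  match lista with
  | [] => []
  | primero :: resto =>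
    if PySem.Int.mod primero 2 = 0 then
      let valor_transformado := primero ^ 2
      [valor_transformado] ++ procesar_lista_recursiva resto
    else
      procesar_lista_recursiva resto

-- ===== PORT B =====
-- B: iterative loop with an accumulator (foldl), appending x^2 for even x
def procesar_lista_recursiva_alt (lista : List Int) : List Int :=
  lista.foldl (fun resultado x =>
    if PySem.Int.mod x 2 = 0 then resultado ++ [x ^ 2] else resultado) []

-- ===== PRECONDITION & SPEC =====
def Spec_procesar_lista_recursiva (lista : List Int) (out : List Int) : Prop := out = procesar_lista_recursiva_alt lista
instance (lista : List Int) (out : List Int) : Decidable (Spec_procesar_lista_recursiva lista out) := by unfold Spec_procesar_lista_recursiva; infer_instance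

-- ===== CLAIM (what is proved, stated in full; the proofs are below) =====
def Claim_equal_procesar_lista_recursiva : Prop := ∀ (lista : List Int), Dom_procesar_lista_recursiva lista → Spec_procesar_lista_recursiva lista (procesar_lista_recursiva lista)

-- ===== LEMMAS AND PROOFS =====
lemma alt_acc (lista : List Int) (acc : List Int) :
    lista.foldl (fun resultado x =>
      if PySem.Int.mod x 2 = 0 then resultado ++ [x ^ 2] else resultado) acc
      = acc ++ procesar_lista_recursiva lista := by
  induction lista generalizing acc with
  | nil => simp [procesar_lista_recursiva]
  | cons h t ih =>
    simp only [List.foldl_cons, procesar_lista_recursiva]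
    split <;> rw [ih] <;> simp

-- ===== VERDICT (by name: the statement is the Claim_ definition above) =====
theorem procesar_lista_recursiva_spec : Claim_equal_procesar_lista_recursiva := by
  intro lista _
  unfold Spec_procesar_lista_recursiva procesar_lista_recursiva_alt
  rw [alt_acc]
  simp
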